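-- pv_equiv track=rewrite | github.com/fengidri/wind | exts/better_edit.py | align_split
-- ===== SOURCE A (Python) =====
-- def align_split(line):
--     start = 1
--     split_list = []
--     buf = []
--     for i in line:
--         if start ==  1:
--             buf.append(i)
--             if not(i in '\t '):
--                 start = 0
--         else:
--             if i in '\t ':
--                 if len(buf) >0:
--                     split_list.append(''.join(buf))
--                     del buf[:]
--             else:
--                 buf.append(i)
--     if len(buf) >0:
--         split_list.append(''.join(buf))
--         del buf[:]
--     return split_list
-- ===== SOURCE B (Python) =====
-- def align_split(line):
--     # Prefix-then-split decomposition: peel the leading blank run, tokenize the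
--     # rest on blank runs, glue the leading run onto the first token.
--     stripped = line.lstrip(' \t')
--     leading = line[:len(line) - len(stripped)]
--     if not stripped:
--         return [leading] if leading else []
--     words = _tokenize(stripped)
--     return [leading + words[0]] + words[1:]
--
--
-- def _tokenize(s):
--     # Split s into its maximal runs of non-blank characters.
--     words = []
--     i, n = 0, len(s)
--     while i < n:
--         k = i
--         while k < n and s[k] not in ' \t':
--             k += 1
--         words.append(s[i:k])
--         i = k
--         while i < n and s[i] in ' \t':
--             i += 1
--     return words
-- ===== Notes on version B (the rewrite author's own statement) =====
-- stated objective: alternative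
-- what changed: Replaces A's single char-by-char state machine (start flag + buffer + flush-on-blank) by a prefix-then-split decomposition: lstrip the leading blank run, tokenize the remainder into maximal non-blank runs, and glue the leading run onto the first token.
import Mathlib
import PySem

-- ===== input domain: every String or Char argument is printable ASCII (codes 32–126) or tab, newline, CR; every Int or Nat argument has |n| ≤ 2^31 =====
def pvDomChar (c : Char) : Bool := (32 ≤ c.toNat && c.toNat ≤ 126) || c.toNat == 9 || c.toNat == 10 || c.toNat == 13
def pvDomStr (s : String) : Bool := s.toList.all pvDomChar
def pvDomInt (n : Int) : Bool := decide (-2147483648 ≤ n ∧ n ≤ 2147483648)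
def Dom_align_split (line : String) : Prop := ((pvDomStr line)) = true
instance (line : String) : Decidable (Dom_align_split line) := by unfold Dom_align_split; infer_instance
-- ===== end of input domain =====

-- B replaces A's char-by-char state machine by a prefix-then-split decomposition
-- (lstrip the leading blank run, split the rest into non-blank runs, glue the
-- leading run onto the first token); alternative structure, same cost.


-- `c in '\t '` in Python: c is a single char, so membership = equality with tab or space (exact)
def pvBlank (c : Char) : Bool := c == '\t' || c == ' '

-- ===== PORT A =====
-- state (start, split_list, buf); `for i in line` = fold over line.toList; ''.join(buf) = String.mk
def alignStep (st : Nat × List String × List Char) (i : Char) : Nat × List String × List Char :=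
  match st with
  | (start, split_list, buf) =>
    if start = 1 then
      let buf := buf ++ [i]
      if ¬ pvBlank i then (0, split_list, buf) else (1, split_list, buf)
    else
      if pvBlank i then
        if buf.length > 0 then (start, split_list ++ [String.mk buf], [])
        else (start, split_list, buf)
      else (start, split_list, buf ++ [i])

def align_split (line : String) : List String :=
  match line.toList.foldl alignStep (1, [], []) with
  | (_, split_list, buf) =>
    if buf.length > 0 then split_list ++ [String.mk buf] else split_list

-- ===== PORT B =====
-- termination of the tokenizer: the rest of the suffix is strictly shorter
theorem pvTok_dec (c : Char) (cs : List Char) :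
    (((c :: cs).dropWhile (fun x => ¬ pvBlank x)).dropWhile pvBlank).length < (c :: cs).length := by
  by_cases hc : pvBlank c
  · rw [List.dropWhile_cons_of_neg (by simp [hc]), List.dropWhile_cons_of_pos hc]
    have := List.length_dropWhile_le pvBlank cs
    simp only [List.length_cons]; omega
  · rw [List.dropWhile_cons_of_pos (by simp [hc])]
    have h1 := List.length_dropWhile_le (fun x => ¬ pvBlank x) cs
    have h2 := List.length_dropWhile_le pvBlank (cs.dropWhile (fun x => ¬ pvBlank x))
    simp only [List.length_cons]; omega

-- _tokenize's while loop: state (words, current suffix s[i:]); the inner scans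
-- `while k < n and s[k] not in ' \t'` / `while i < n and s[i] in ' \t'` compute
-- exactly takeWhile/dropWhile of the suffix, and s[i:k] is that takeWhile (exact).
def pvTokenize (words : List (List Char)) (s : List Char) : List (List Char) :=
  match s with
  | [] => words
  | c :: cs =>
      pvTokenize (words ++ [(c :: cs).takeWhile (fun x => ¬ pvBlank x)])
        (((c :: cs).dropWhile (fun x => ¬ pvBlank x)).dropWhile pvBlank)
termination_by s.length
decreasing_by
  exact pvTok_dec c cs

-- line.lstrip(' \t') = dropWhile blank; line[:len(line)-len(stripped)] = take (exact: 0 ≤ k ≤ len)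
def align_split_alt (line : String) : List String :=
  let cs := line.toList
  let stripped := cs.dropWhile pvBlank
  let leading := cs.take (cs.length - stripped.length)
  if stripped.isEmpty then
    if leading.isEmpty then [] else [String.mk leading]
  else
    match pvTokenize [] stripped with
    | [] => []   -- unreachable: pvTokenize on nonempty input yields ≥ 1 word
    | w :: ws => String.mk (leading ++ w) :: ws.map String.mk

-- ===== PRECONDITION & SPEC =====
def Spec_align_split (line : String) (out : List String) : Prop := out = align_split_alt line
instance (line : String) (out : List String) : Decidable (Spec_align_split line out) := by unfold Spec_align_split; infer_instance

-- ===== CLAIM (what is proved, stated in full; the proofs are below) =====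
def Claim_equal_align_split : Prop := ∀ (line : String), Dom_align_split line → Spec_align_split line (align_split line)

-- ===== LEMMAS AND PROOFS =====

-- proof-side recursive reading of A's phase-0 fold (start = 0)
def tok0 : List Char → List Char → List String
  | buf, [] => if buf.isEmpty then [] else [String.mk buf]
  | buf, c :: cs =>
      if pvBlank c then
        if buf.isEmpty then tok0 [] cs else String.mk buf :: tok0 [] cs
      else tok0 (buf ++ [c]) cs

-- proof-side accumulator-free tokenizer
def tok : List Char → List (List Char)
  | [] => []
  | c :: cs =>
      (c :: cs).takeWhile (fun x => ¬ pvBlank x) ::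
        tok (((c :: cs).dropWhile (fun x => ¬ pvBlank x)).dropWhile pvBlank)
termination_by s => s.length
decreasing_by
  exact pvTok_dec c cs

def finishA (st : Nat × List String × List Char) : List String :=
  match st with
  | (_, split_list, buf) => if buf.length > 0 then split_list ++ [String.mk buf] else split_list

theorem pvTokenize_eq_tok (s : List Char) (words : List (List Char)) :
    pvTokenize words s = words ++ tok s := by
  induction s using tok.induct generalizing words with
  | case1 => simp [pvTokenize, tok]
  | case2 c cs ih => rw [pvTokenize, tok, ih]; simp

-- phase 0 of A's fold computes tok0
theorem foldl_phase0 (cs : List Char) (sl : List String) (buf : List Char) :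
    finishA (cs.foldl alignStep (0, sl, buf)) = sl ++ tok0 buf cs := by
  induction cs generalizing sl buf with
  | nil =>
    simp only [List.foldl_nil, finishA, tok0]
    cases buf <;> simp
  | cons c cs ih =>
    simp only [List.foldl_cons, alignStep, tok0]
    by_cases hc : pvBlank c
    · simp only [hc, if_true, if_pos]
      cases buf with
      | nil => simp [ih]
      | cons b bs => simp only [List.length_cons, List.isEmpty_cons] at *; simp [ih]
    · simp [hc, ih]

-- tok0 with an empty buffer tokenizes after skipping blanks; with a nonempty
-- buffer it extends the buffer by the current non-blank run (mutual, by length)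
theorem tok0_spec (n : Nat) : ∀ cs : List Char, cs.length ≤ n →
    (tok0 [] cs = (tok (cs.dropWhile pvBlank)).map String.mk) ∧
    (∀ buf : List Char, buf ≠ [] →
      tok0 buf cs =
        String.mk (buf ++ cs.takeWhile (fun x => ¬ pvBlank x)) ::
          (tok (((cs.dropWhile (fun x => ¬ pvBlank x)).dropWhile pvBlank))).map String.mk) := by
  induction n with
  | zero =>
    intro cs hcs
    have : cs = [] := List.eq_nil_of_length_eq_zero (Nat.le_zero.mp hcs)
    subst this
    constructor
    · simp [tok0, tok]
    · intro buf hbuf; simp [tok0, tok, hbuf]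
  | succ n ih =>
    intro cs hcs
    cases cs with
    | nil =>
      constructor
      · simp [tok0, tok]
      · intro buf hbuf; simp [tok0, tok, hbuf]
    | cons c cs =>
      simp only [List.length_cons, Nat.succ_le_succ_iff] at hcs
      constructor
      · by_cases hc : pvBlank c
        · simp only [tok0, hc, if_true, List.isEmpty_nil, List.dropWhile_cons_of_pos hc]
          exact (ih cs hcs).1
        · simp only [tok0, hc, List.isEmpty_nil, if_true, List.nil_append,
            Bool.false_eq_true, if_false]
          rw [(ih cs hcs).2 [c] (by simp)]
          rw [List.dropWhile_cons_of_neg (by simp [hc]), tok]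
          simp [List.takeWhile_cons, List.dropWhile_cons_of_pos, hc]
      · intro buf hbuf
        obtain ⟨b, bs, rfl⟩ : ∃ b bs, buf = b :: bs := by
          cases buf with
          | nil => exact absurd rfl hbuf
          | cons b bs => exact ⟨b, bs, rfl⟩
        by_cases hc : pvBlank c
        · simp only [tok0, hc, if_true, List.isEmpty_cons, Bool.false_eq_true, if_false]
          rw [(ih cs hcs).1]
          rw [List.takeWhile_cons_of_neg (by simp [hc]),
            List.dropWhile_cons_of_neg (by simp [hc]),
            List.dropWhile_cons_of_pos hc]
          simp
        · simp only [tok0, hc, Bool.false_eq_true, if_false]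
          rw [(ih cs hcs).2 ((b :: bs) ++ [c]) (by simp)]
          rw [List.takeWhile_cons_of_pos (by simp [hc]),
            List.dropWhile_cons_of_pos (by simp [hc])]
          simp

-- A's full fold (phase 1 then phase 0) in terms of takeWhile/dropWhile/tok0
theorem foldl_phase1 (cs : List Char) (buf : List Char) :
    finishA (cs.foldl alignStep (1, [], buf)) =
      (match cs.dropWhile pvBlank with
       | [] => if (buf ++ cs).isEmpty then [] else [String.mk (buf ++ cs)]
       | c :: rest => tok0 (buf ++ cs.takeWhile pvBlank ++ [c]) rest) := by
  induction cs generalizing buf with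
  | nil =>
    simp only [List.foldl_nil, List.dropWhile_nil, List.append_nil, finishA]
    cases buf <;> simp
  | cons c cs ih =>
    by_cases hc : pvBlank c
    · simp only [List.foldl_cons, alignStep, hc, if_true, not_true_eq_false, if_false,
        List.dropWhile, List.takeWhile, decide_true, if_pos]
      rw [ih (buf ++ [c])]
      cases h : cs.dropWhile pvBlank <;> simp
    · simp only [List.foldl_cons, alignStep, hc, not_false_eq_true, if_true, if_pos rfl,
        List.dropWhile, List.takeWhile, decide_false, Bool.false_eq_true, if_false]
      rw [foldl_phase0]
      simp

-- leading computed by length subtraction IS the blank takeWhile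
theorem take_sub_dropWhile (cs : List Char) :
    cs.take (cs.length - (cs.dropWhile pvBlank).length) = cs.takeWhile pvBlank := by
  have hlen : (cs.takeWhile pvBlank).length + (cs.dropWhile pvBlank).length = cs.length := by
    rw [← List.length_append, List.takeWhile_append_dropWhile]
  have h2 : (cs.takeWhile pvBlank ++ cs.dropWhile pvBlank).take
      (cs.takeWhile pvBlank).length = cs.takeWhile pvBlank := List.take_left' rfl
  rw [List.takeWhile_append_dropWhile] at h2
  rw [show cs.length - (cs.dropWhile pvBlank).length = (cs.takeWhile pvBlank).length by omega]
  exact h2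

-- ===== VERDICT (by name: the statement is the Claim_ definition above) =====
theorem align_split_spec : Claim_equal_align_split := by
  intro line _
  unfold Spec_align_split align_split align_split_alt
  simp only [take_sub_dropWhile]
  show finishA (line.toList.foldl alignStep (1, [], [])) = _
  rw [foldl_phase1]
  simp only [List.nil_append]
  cases hd : line.toList.dropWhile pvBlank with
  | nil =>
    have ht : line.toList.takeWhile pvBlank = line.toList := by
      conv_rhs => rw [← List.takeWhile_append_dropWhile (p := pvBlank) (l := line.toList)]
      rw [hd, List.append_nil]
    rw [ht]
    simp
  | cons c rest =>
    have hc : ¬ pvBlank c = true := by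
      have := List.head_dropWhile_not (p := pvBlank) (l := line.toList) (by simp [hd])
      simpa [hd] using this
    simp only [List.isEmpty_cons, Bool.false_eq_true, if_false]
    rw [(tok0_spec rest.length rest le_rfl).2
      (line.toList.takeWhile pvBlank ++ [c]) (by simp)]
    rw [pvTokenize_eq_tok, List.nil_append, tok]
    rw [List.takeWhile_cons_of_pos (by simp [hc]),
      List.dropWhile_cons_of_pos (by simp [hc])]
    simp
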